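-- pv_equiv track=rewrite | github.com/pypi-data/pypi-mirror-162 | packages/pyken/pyken-0.8.2-py3-none-any.whl/pyken/carpe.py | breakpoints_to_str
-- ===== SOURCE A (Python) =====
-- def breakpoints_to_str(breakpoints_num, categories):
--
--     ''' Convierte los breakpoints numéricos en los
--     asociados de tipo texto siguiendo las categorias '''
--
--     breakpoints_str = []
--     for i in range(len(breakpoints_num)):
--         if i == 0:
--             breakpoints_str.append([j[0] for j in categories.items()
--             if j[1] < breakpoints_num[i]])
--         else:
--             breakpoints_str.append([j[0] for j in categories.items()
--             if breakpoints_num[i-1] <= j[1] < breakpoints_num[i]])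
--         if i == len(breakpoints_num) - 1:
--             breakpoints_str.append([j[0] for j in categories.items()
--             if breakpoints_num[i] <= j[1]])
--
--     return breakpoints_str
-- ===== SOURCE B (Python) =====
-- def breakpoints_to_str(breakpoints_num, categories):
--     # Category-major single pass: each category is routed into the bucket(s)
--     # whose interval condition it satisfies, instead of re-scanning all
--     # categories once per bucket.
--     n = len(breakpoints_num)
--     if n == 0:
--         return []
--
--     def lands(idx, value):
--         lo = idx == 0 or breakpoints_num[idx - 1] <= value
--         hi = idx == n or value < breakpoints_num[idx]
--         return lo and hi
--
--     buckets = [[] for _ in range(n + 1)]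
--     for name, value in categories.items():
--         for idx, b in enumerate(buckets):
--             if lands(idx, value):
--                 b.append(name)
--     return buckets
-- ===== Notes on version B (the rewrite author's own statement) =====
-- stated objective: alternative
-- what changed: Bucket-major nested comprehensions (one scan of all categories per breakpoint interval) replaced by a category-major single pass that routes each category into the bucket(s) whose interval condition it satisfies, with a uniform lands(idx,value) predicate instead of A's three special-cased comprehensions.
import Mathlib
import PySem

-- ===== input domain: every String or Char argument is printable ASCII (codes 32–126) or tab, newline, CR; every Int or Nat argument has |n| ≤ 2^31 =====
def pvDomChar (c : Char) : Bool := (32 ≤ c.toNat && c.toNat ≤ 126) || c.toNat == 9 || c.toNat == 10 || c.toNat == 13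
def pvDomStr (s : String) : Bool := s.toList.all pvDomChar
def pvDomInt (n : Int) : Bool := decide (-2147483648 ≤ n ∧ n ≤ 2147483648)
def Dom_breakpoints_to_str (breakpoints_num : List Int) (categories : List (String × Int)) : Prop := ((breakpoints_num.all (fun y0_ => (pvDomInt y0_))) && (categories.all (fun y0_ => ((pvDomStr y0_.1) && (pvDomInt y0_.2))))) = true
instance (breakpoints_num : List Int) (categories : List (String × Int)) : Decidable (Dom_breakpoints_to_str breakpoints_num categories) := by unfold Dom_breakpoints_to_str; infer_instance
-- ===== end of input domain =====

-- B replaces A's bucket-major comprehensions (one scan of categories per interval) by a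
-- category-major single pass routing each category into its bucket(s): an alternative
-- decomposition of the same O(n*m) task.


-- ===== PORT A =====
def breakpoints_to_str (breakpoints_num : List Int) (categories : List (String × Int)) : List (List String) :=
  (PySem.List.pyRange 0 (breakpoints_num.length : Int) 1).foldl (fun acc i =>
    let acc :=
      if i == 0 then
        acc ++ [(categories.filter (fun j => decide (j.2 < PySem.List.pyGetD breakpoints_num i 0))).map Prod.fst]
      else
        acc ++ [(categories.filter (fun j =>
          decide (PySem.List.pyGetD breakpoints_num (i - 1) 0 ≤ j.2) &&
          decide (j.2 < PySem.List.pyGetD breakpoints_num i 0))).map Prod.fst]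
    if i == (breakpoints_num.length : Int) - 1 then
      acc ++ [(categories.filter (fun j => decide (PySem.List.pyGetD breakpoints_num i 0 ≤ j.2))).map Prod.fst]
    else acc) []

-- ===== PORT B =====
-- helper of B: does the category value `v` land in bucket `idx` (0 .. n)?
def pvLands (bp : List Int) (n : Int) (idx : Int) (v : Int) : Bool :=
  (idx == 0 || decide (PySem.List.pyGetD bp (idx - 1) 0 ≤ v)) &&
  (idx == n || decide (v < PySem.List.pyGetD bp idx 0))

def breakpoints_to_str_alt (breakpoints_num : List Int) (categories : List (String × Int)) : List (List String) :=
  let n : Int := (breakpoints_num.length : Int)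
  if n == 0 then []
  else
    categories.foldl (fun buckets p =>
      (PySem.List.enumerate buckets 0).map (fun ib =>
        if pvLands breakpoints_num n ib.1 p.2 then ib.2 ++ [p.1] else ib.2))
      (List.replicate (breakpoints_num.length + 1) [])

-- ===== PRECONDITION & SPEC =====
def Spec_breakpoints_to_str (breakpoints_num : List Int) (categories : List (String × Int)) (out : List (List String)) : Prop := out = breakpoints_to_str_alt breakpoints_num categories
instance (breakpoints_num : List Int) (categories : List (String × Int)) (out : List (List String)) : Decidable (Spec_breakpoints_to_str breakpoints_num categories out) := by unfold Spec_breakpoints_to_str; infer_instance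

-- ===== CLAIM (what is proved, stated in full; the proofs are below) =====
def Claim_equal_breakpoints_to_str : Prop := ∀ (breakpoints_num : List Int) (categories : List (String × Int)), Dom_breakpoints_to_str breakpoints_num categories → Spec_breakpoints_to_str breakpoints_num categories (breakpoints_to_str breakpoints_num categories)

-- ===== LEMMAS AND PROOFS =====

-- the common normal form both ports are reduced to: one bucket per index i ∈ [0, n+1)
def pvBucket (bp : List Int) (cats : List (String × Int)) (i : Int) : List String :=
  (cats.filter (fun p => pvLands bp (bp.length : Int) i p.2)).map Prod.fst

def pvSpec (bp : List Int) (cats : List (String × Int)) : List (List String) :=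
  (PySem.List.pyRange 0 ((bp.length : Int) + 1) 1).map (pvBucket bp cats)

-- what one iteration of A's loop appends
def pvGA (bp : List Int) (cats : List (String × Int)) (i : Int) : List (List String) :=
  (if i == 0 then
      [(cats.filter (fun j => decide (j.2 < PySem.List.pyGetD bp i 0))).map Prod.fst]
    else
      [(cats.filter (fun j =>
        decide (PySem.List.pyGetD bp (i - 1) 0 ≤ j.2) &&
        decide (j.2 < PySem.List.pyGetD bp i 0))).map Prod.fst]) ++
  (if i == (bp.length : Int) - 1 then
      [(cats.filter (fun j => decide (PySem.List.pyGetD bp i 0 ≤ j.2))).map Prod.fst]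
    else [])

lemma flatMap_eq_map_of_mem {α β : Type} {l : List α} {f : α → List β} {g : α → β}
    (h : ∀ a ∈ l, f a = [g a]) : l.flatMap f = l.map g := by
  induction l with
  | nil => rfl
  | cons x xs ih =>
      simp only [List.flatMap_cons, List.map_cons, h x (by simp),
        ih (fun a ha => h a (by simp [ha]))]
      rfl

lemma pvGA_mid (bp : List Int) (cats : List (String × Int)) (i : Int)
    (h0 : 0 ≤ i) (h1 : i < (bp.length : Int) - 1) :
    pvGA bp cats i = [pvBucket bp cats i] := by
  have hlast : i ≠ (bp.length : Int) - 1 := by omega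
  have hn : i ≠ (bp.length : Int) := by omega
  have hlast' : (i == (bp.length : Int) - 1) = false := by simpa using hlast
  have hn' : (i == (bp.length : Int)) = false := by simpa using hn
  by_cases hi : i = 0
  · subst hi
    simp [pvGA, pvBucket, pvLands, hlast', hn']
  · have hi' : (i == (0 : Int)) = false := by simpa using hi
    simp [pvGA, pvBucket, pvLands, hlast', hn', hi']

lemma pvGA_last (bp : List Int) (cats : List (String × Int))
    (hn : 1 ≤ (bp.length : Int)) :
    pvGA bp cats ((bp.length : Int) - 1) =
      [pvBucket bp cats ((bp.length : Int) - 1), pvBucket bp cats (bp.length : Int)] := by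
  by_cases h1 : (bp.length : Int) = 1
  · simp [pvGA, pvBucket, pvLands, h1]
  · have hi0 : ((bp.length : Int) - 1 == (0 : Int)) = false := beq_eq_false_iff_ne.mpr (by omega)
    have hin : ((bp.length : Int) - 1 == (bp.length : Int)) = false := beq_eq_false_iff_ne.mpr (by omega)
    have hne0 : ((bp.length : Int) == (0 : Int)) = false := beq_eq_false_iff_ne.mpr (by omega)
    simp [pvGA, pvBucket, pvLands, hi0, hin, hne0]

lemma pvA_eq_spec (bp : List Int) (cats : List (String × Int)) (hbp : bp ≠ []) :
    breakpoints_to_str bp cats = pvSpec bp cats := by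
  have hn : (1 : Int) ≤ (bp.length : Int) := by
    have : 0 < bp.length := List.length_pos_of_ne_nil hbp
    omega
  have hstep : ∀ (acc : List (List String)) (i : Int),
      (let acc' :=
        if i == 0 then
          acc ++ [(cats.filter (fun j => decide (j.2 < PySem.List.pyGetD bp i 0))).map Prod.fst]
        else
          acc ++ [(cats.filter (fun j =>
            decide (PySem.List.pyGetD bp (i - 1) 0 ≤ j.2) &&
            decide (j.2 < PySem.List.pyGetD bp i 0))).map Prod.fst]
      if i == (bp.length : Int) - 1 then
        acc' ++ [(cats.filter (fun j => decide (PySem.List.pyGetD bp i 0 ≤ j.2))).map Prod.fst]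
      else acc') = acc ++ pvGA bp cats i := by
    intro acc i
    unfold pvGA
    by_cases h0 : i == 0 <;> by_cases h1 : i == (bp.length : Int) - 1 <;>
      simp [h0, h1, List.append_assoc]
  unfold breakpoints_to_str
  rw [List.foldl_ext _ _ _ (fun acc i _ => hstep acc i),
    PySem.List.foldl_append_eq_flatMap, List.nil_append]
  have hsplit : PySem.List.pyRange 0 (bp.length : Int) 1 =
      PySem.List.pyRange 0 ((bp.length : Int) - 1) 1 ++ [(bp.length : Int) - 1] := by
    have h := PySem.List.pyRange_one_succ_right (a := 0) (b := (bp.length : Int) - 1) (by omega)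
    rw [show (bp.length : Int) - 1 + 1 = (bp.length : Int) from by ring] at h
    exact h
  rw [hsplit, List.flatMap_append,
    flatMap_eq_map_of_mem (g := pvBucket bp cats) (fun a ha => by
      rw [PySem.List.mem_pyRange_one] at ha
      exact pvGA_mid bp cats a ha.1 ha.2)]
  have hsplit2 : PySem.List.pyRange 0 ((bp.length : Int) + 1) 1 =
      (PySem.List.pyRange 0 ((bp.length : Int) - 1) 1 ++ [(bp.length : Int) - 1]) ++ [(bp.length : Int)] := by
    rw [← hsplit]
    exact PySem.List.pyRange_one_succ_right (by omega)
  unfold pvSpec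
  rw [hsplit2]
  simp [pvGA_last bp cats hn]

lemma enumerate_map_enumerate {α β : Type} (st : List α) (s : Int) (f : Int × α → β) :
    PySem.List.enumerate ((PySem.List.enumerate st s).map f) s
      = (PySem.List.enumerate st s).map (fun ib => (ib.1, f ib)) := by
  induction st generalizing s with
  | nil => simp [PySem.List.enumerate_nil]
  | cons x xs ih => simp [PySem.List.enumerate_cons, ih]

lemma pvBfold (bp : List Int) (cats : List (String × Int)) :
    ∀ st : List (List String),
      cats.foldl (fun buckets p =>
        (PySem.List.enumerate buckets 0).map (fun ib =>
          if pvLands bp (bp.length : Int) ib.1 p.2 then ib.2 ++ [p.1] else ib.2)) st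
      = (PySem.List.enumerate st 0).map (fun ib =>
          ib.2 ++ (cats.filter (fun p => pvLands bp (bp.length : Int) ib.1 p.2)).map Prod.fst) := by
  induction cats with
  | nil =>
      intro st
      simp [PySem.List.map_snd_enumerate]
  | cons p rest ih =>
      intro st
      simp only [List.foldl_cons, ih, enumerate_map_enumerate, List.map_map]
      congr 1
      funext ib
      by_cases h : pvLands bp (bp.length : Int) ib.1 p.2 <;>
        simp [h, List.append_assoc]

lemma enumerate_replicate {α : Type} (m : Nat) (s : Int) (a : α) :
    PySem.List.enumerate (List.replicate m a) s
      = (PySem.List.pyRange s (s + (m : Int)) 1).map (fun i => (i, a)) := by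
  induction m generalizing s with
  | zero => simp [PySem.List.enumerate_nil, PySem.List.pyRange_one_eq_nil]
  | succ k ih =>
      have hc : PySem.List.pyRange s (s + ((k : Int) + 1)) 1
          = s :: PySem.List.pyRange (s + 1) (s + ((k : Int) + 1)) 1 :=
        PySem.List.pyRange_one_cons (by omega)
      rw [List.replicate_succ, PySem.List.enumerate_cons, ih,
        show (((k + 1 : Nat)) : Int) = (k : Int) + 1 from by push_cast; ring, hc,
        show s + ((k : Int) + 1) = (s + 1) + (k : Int) from by ring]
      simp

lemma pvB_eq_spec (bp : List Int) (cats : List (String × Int)) (hbp : bp ≠ []) :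
    breakpoints_to_str_alt bp cats = pvSpec bp cats := by
  have hn0 : ((bp.length : Int) == 0) = false := by
    have : 0 < bp.length := List.length_pos_of_ne_nil hbp
    simp; omega
  unfold breakpoints_to_str_alt
  simp only [hn0, Bool.false_eq_true, if_false]
  rw [pvBfold, enumerate_replicate, List.map_map]
  unfold pvSpec pvBucket
  push_cast
  simp [Function.comp]

-- ===== VERDICT (by name: the statement is the Claim_ definition above) =====
theorem breakpoints_to_str_spec : Claim_equal_breakpoints_to_str := by
  intro bp cats _
  unfold Spec_breakpoints_to_str
  by_cases hbp : bp = []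
  · subst hbp
    simp [breakpoints_to_str, breakpoints_to_str_alt, PySem.List.pyRange_one_eq_nil]
  · rw [pvA_eq_spec bp cats hbp, pvB_eq_spec bp cats hbp]
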